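-- pv_equiv track=rewrite | github.com/AliKhanafer7/PythonProjects | ITI1120 Assignement 2/a2_part2_300010614.py | alienNumbersAgain
-- ===== SOURCE A (Python) =====
-- def alienNumbersAgain(s):
--     '''(str)->int
-- Returns the integer value represented by string s using alien numbers.
-- Precondtions: s must only include characters 'Ty!aNU' '''
--     accumilator=0
--     for i in s:
--         if i=='T':
--             accumilator=accumilator+1024
--         if i=='y':
--             accumilator=accumilator+598
--         if i=='!':
--             accumilator=accumilator+121
--         if i=='a':
--             accumilator=accumilator+42
--         if i=='N':
--             accumilator=accumilator+6
--         if i=='U':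
--             accumilator=accumilator+1
--     return accumilator
-- ===== SOURCE B (Python) =====
-- def alienNumbersAgain(s):
--     '''(str)->int Build a count table of s, then weight the six known symbols.'''
--     mapping = (('T', 1024), ('y', 598), ('!', 121), ('a', 42), ('N', 6), ('U', 1))
--     counts = {}
--     for ch in s:
--         counts[ch] = counts.get(ch, 0) + 1
--     return sum(counts.get(ch, 0) * w for ch, w in mapping)
-- ===== Notes on version B (the rewrite author's own statement) =====
-- stated objective: alternative
-- what changed: B builds a character-count table of s in one pass and then sums count*weight over the six fixed symbols, instead of scanning s with six per-character branches and a running accumulator.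
import Mathlib
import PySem

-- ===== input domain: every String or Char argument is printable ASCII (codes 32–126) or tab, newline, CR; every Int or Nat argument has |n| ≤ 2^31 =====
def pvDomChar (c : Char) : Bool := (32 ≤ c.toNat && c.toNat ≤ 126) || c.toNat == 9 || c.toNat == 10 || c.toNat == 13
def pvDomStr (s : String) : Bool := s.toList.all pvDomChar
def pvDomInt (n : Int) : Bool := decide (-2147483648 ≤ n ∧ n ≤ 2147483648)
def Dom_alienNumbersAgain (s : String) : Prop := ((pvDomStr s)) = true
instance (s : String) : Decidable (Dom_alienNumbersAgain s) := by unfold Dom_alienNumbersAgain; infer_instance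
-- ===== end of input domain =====

-- B builds a count table of s and sums count*weight over the six fixed symbols (alternative decomposition; same cost).


-- ===== PORT A =====
-- the loop body: six consecutive `if` statements each re-assigning the accumulator
def alienStep (acc : Int) (i : Char) : Int :=
  let acc := if i == 'T' then acc + 1024 else acc
  let acc := if i == 'y' then acc + 598 else acc
  let acc := if i == '!' then acc + 121 else acc
  let acc := if i == 'a' then acc + 42 else acc
  let acc := if i == 'N' then acc + 6 else acc
  let acc := if i == 'U' then acc + 1 else acc
  acc

def alienNumbersAgain (s : String) : Int :=
  s.toList.foldl alienStep 0

-- ===== PORT B =====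
def alienMapping : List (Char × Int) :=
  [('T', 1024), ('y', 598), ('!', 121), ('a', 42), ('N', 6), ('U', 1)]

def alienNumbersAgain_alt (s : String) : Int :=
  let counts : PySem.Dict Char Int :=
    s.toList.foldl (fun d ch => d.insert ch (d.getD ch 0 + 1)) PySem.Dict.empty
  (alienMapping.map (fun p => counts.getD p.1 0 * p.2)).sum

-- ===== PRECONDITION & SPEC =====
def Spec_alienNumbersAgain (s : String) (out : Int) : Prop := out = alienNumbersAgain_alt s
instance (s : String) (out : Int) : Decidable (Spec_alienNumbersAgain s out) := by unfold Spec_alienNumbersAgain; infer_instance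

-- ===== CLAIM (what is proved, stated in full; the proofs are below) =====
def Claim_equal_alienNumbersAgain : Prop := ∀ (s : String), Dom_alienNumbersAgain s → Spec_alienNumbersAgain s (alienNumbersAgain s)

-- ===== LEMMAS AND PROOFS =====
-- B's value, rewritten to per-symbol counts of the character list
theorem alt_eq_counts (s : String) :
    alienNumbersAgain_alt s =
      (s.toList.count 'T' : Int) * 1024 + (s.toList.count 'y' : Int) * 598 +
      (s.toList.count '!' : Int) * 121 + (s.toList.count 'a' : Int) * 42 +
      (s.toList.count 'N' : Int) * 6 + (s.toList.count 'U' : Int) * 1 := by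
  simp [alienNumbersAgain_alt, alienMapping, PySem.Dict.getD_foldl_insert_add_one]
  ring

-- A's fold, with an arbitrary starting accumulator, equals the start plus the weighted counts
theorem foldl_step_eq (l : List Char) (a : Int) :
    l.foldl alienStep a =
      a + ((l.count 'T' : Int) * 1024 + (l.count 'y' : Int) * 598 +
      (l.count '!' : Int) * 121 + (l.count 'a' : Int) * 42 +
      (l.count 'N' : Int) * 6 + (l.count 'U' : Int) * 1) := by
  induction l generalizing a with
  | nil => simp
  | cons c l ih =>
    simp only [List.foldl_cons, ih, List.count_cons, alienStep]
    split_ifs with h1 h2 h3 h4 h5 h6 <;>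
      simp_all [beq_iff_eq] <;> ring

-- ===== VERDICT (by name: the statement is the Claim_ definition above) =====
theorem alienNumbersAgain_spec : Claim_equal_alienNumbersAgain := by
  intro s _
  show alienNumbersAgain s = alienNumbersAgain_alt s
  rw [alienNumbersAgain, foldl_step_eq, alt_eq_counts]
  ring
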